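-- pv_equiv track=rewrite | github.com/combio-dku/scoda_explorer | src/scodaviz/plotlib.py | remove_mac_common_markers
-- ===== SOURCE A (Python) =====
-- def remove_mac_common_markers(mkrs_dict):
--
--     lst2 = list(mkrs_dict.keys())
--     lst = []
--     Mono = None
--     for item in lst2:
--         if item[:3] == 'Mac':
--             lst.append(item)
--         if item[:4] == 'Mono':
--             Mono = item
--
--     if len(lst) > 1:
--         mac_common = mkrs_dict[lst[0]]
--         for item in lst[1:]:
--             mac_common = list(set(mac_common).intersection(mkrs_dict[item]))
--
--         for item in lst:
--             for mkr in mac_common: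
--                 mkrs_dict[item].remove(mkr)
-- #         if Mono is not None:
-- #             mono_lst = mkrs_dict[Mono]
-- #             del mkrs_dict[Mono]
-- #             mkrs_dict[Mono] = mono_lst
--
--     return mkrs_dict
-- ===== SOURCE B (Python) =====
-- def remove_mac_common_markers(mkrs_dict):
--     mac_keys = [k for k in mkrs_dict if k[:3] == 'Mac']
--     if len(mac_keys) > 1:
--         common = set(mkrs_dict[mac_keys[0]])
--         for k in mac_keys[1:]:
--             common = common & set(mkrs_dict[k])
--         for k in mac_keys:
--             pending = set(common)
--             kept = []
--             for m in mkrs_dict[k]: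
--                 if m in pending:
--                     pending.discard(m)
--                 else:
--                     kept.append(m)
--             mkrs_dict[k][:] = kept
--     return mkrs_dict
-- ===== Notes on version B (the rewrite author's own statement) =====
-- stated objective: alternative
-- what changed: The removal step no longer calls list.remove once per common marker per Mac list (a rescan each time); each Mac list is rebuilt in one linear pass that skips the first occurrence of each still-pending common marker, written back with slice assignment.
import Mathlib
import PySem

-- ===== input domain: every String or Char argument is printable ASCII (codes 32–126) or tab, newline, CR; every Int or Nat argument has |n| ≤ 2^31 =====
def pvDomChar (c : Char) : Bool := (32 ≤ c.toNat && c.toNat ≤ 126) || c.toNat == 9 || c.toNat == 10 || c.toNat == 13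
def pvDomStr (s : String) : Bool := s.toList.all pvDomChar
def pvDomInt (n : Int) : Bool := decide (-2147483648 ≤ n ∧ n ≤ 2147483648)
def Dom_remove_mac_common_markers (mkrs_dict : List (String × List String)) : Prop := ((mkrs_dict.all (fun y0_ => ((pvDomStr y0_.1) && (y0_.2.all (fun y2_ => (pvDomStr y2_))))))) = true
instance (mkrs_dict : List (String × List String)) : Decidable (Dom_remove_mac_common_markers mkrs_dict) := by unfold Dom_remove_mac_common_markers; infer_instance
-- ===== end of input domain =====

-- B replaces A's repeated list.remove of each common marker by one linear scan per Mac list with a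
-- pending-removal set (objective: alternative removal algorithm). Both Pythons mutate mkrs_dict's
-- value lists in place and return it; the equivalence proved here is about the returned value.

-- ===== PORT A =====
-- the body of A's first loop: one pass accumulating (lst, Mono); Mono is never used by A's live code
def pvMacMonoStep (st : List String × Option String) (item : String) : List String × Option String :=
  let st1 := if PySem.Str.slice item none (some 3) == "Mac" then (st.1 ++ [item], st.2) else st
  if PySem.Str.slice item none (some 4) == "Mono" then (st1.1, some item) else st1

-- Python A mutates mkrs_dict's value lists in place via list.remove; the port threads the dict.
def remove_mac_common_markers (mkrs_dict : List (String × List String)) : List (String × List String) :=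
  let d := PySem.Dict.mk mkrs_dict
  let lst2 := d.keys
  let st := lst2.foldl pvMacMonoStep (([] : List String), (none : Option String))
  let lst := st.1
  if lst.length > 1 then
    -- mkrs_dict[lst[0]]: lst ≠ [] in this branch and every element of lst is a key of d
    let mac0 := d.getD lst.headI []
    -- list(set(mac_common).intersection(...)): Python's hash iteration order is not modelled;
    -- PySem.Set's canonical order is used — the returned dict does not depend on that order.
    let mac_common := (lst.drop 1).foldl
        (fun mc item => PySem.Set.inter (PySem.Set.ofList mc) (d.getD item [])) mac0
    -- mkrs_dict[item].remove(mkr): mkr is always present (mac_common ⊆ every Mac list), so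
    -- remove? never returns none here; .getD v is the unreachable default.
    let d2 := lst.foldl (fun dd item =>
        dd.modify item [] (fun v =>
          mac_common.foldl (fun v mkr => (PySem.List.remove? v mkr).getD v) v)) d
    d2.items
  else
    d.items

-- ===== PORT B =====
-- one pass over a value list, dropping the FIRST occurrence of each still-pending common marker
def pvScanRemove (pending : PySem.Set String) (v : List String) : List String :=
  match v with
  | [] => []
  | m :: t =>
    if PySem.Set.contains pending m then pvScanRemove (PySem.Set.discard pending m) t
    else m :: pvScanRemove pending t

-- Source B writes each rebuilt list back in place under its (unique, by Pre_) key: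
-- on the association list that is one map over the entries.
def remove_mac_common_markers_alt (mkrs_dict : List (String × List String)) : List (String × List String) :=
  let d := PySem.Dict.mk mkrs_dict
  let mac_keys := d.keys.filter (fun k => PySem.Str.slice k none (some 3) == "Mac")
  if mac_keys.length > 1 then
    let common := (mac_keys.drop 1).foldl (fun c k => PySem.Set.inter c (d.getD k []))
        (PySem.Set.ofList (d.getD mac_keys.headI []))
    mkrs_dict.map (fun kv =>
      if PySem.Str.slice kv.1 none (some 3) == "Mac" then (kv.1, pvScanRemove common kv.2) else kv)
  else mkrs_dict

-- ===== PRECONDITION & SPEC =====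
-- Pre_ excludes association lists with duplicate keys: a Python dict cannot contain them,
-- so such lists do not represent any input the Python programs can receive.
def Pre_remove_mac_common_markers (mkrs_dict : List (String × List String)) : Prop :=
  (mkrs_dict.map Prod.fst).Nodup

instance (mkrs_dict : List (String × List String)) : Decidable (Pre_remove_mac_common_markers mkrs_dict) := by
  unfold Pre_remove_mac_common_markers; infer_instance

def pvWitness_remove_mac_common_markers : (List (String × List String)) :=
  [("MacA", ["x", "y"]), ("MacB", ["y", "z"]), ("Mono", ["y"])]

def Spec_remove_mac_common_markers (mkrs_dict : List (String × List String)) (out : List (String × List String)) : Prop := out = remove_mac_common_markers_alt mkrs_dict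
instance (mkrs_dict : List (String × List String)) (out : List (String × List String)) : Decidable (Spec_remove_mac_common_markers mkrs_dict out) := by unfold Spec_remove_mac_common_markers; infer_instance

-- ===== CLAIM (what is proved, stated in full; the proofs are below) =====
def Claim_equal_remove_mac_common_markers : Prop := ∀ (mkrs_dict : List (String × List String)), Dom_remove_mac_common_markers mkrs_dict → Pre_remove_mac_common_markers mkrs_dict → Spec_remove_mac_common_markers mkrs_dict (remove_mac_common_markers mkrs_dict)

-- ===== LEMMAS AND PROOFS =====

theorem pv_contains_iff (s : List String) (x : String) :
    PySem.Set.contains s x = true ↔ x ∈ s := by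
  simp [PySem.Set.contains]

theorem pv_contains_eq_false {s : List String} {x : String} (h : x ∉ s) :
    PySem.Set.contains s x = false := by
  cases hh : PySem.Set.contains s x
  · rfl
  · exact absurd ((pv_contains_iff s x).mp hh) h

-- A's single remove-first-occurrence step is List.erase
theorem pv_oneRemove_eq_erase (v : List String) (m : String) :
    (PySem.List.remove? v m).getD v = v.erase m := by
  by_cases h : m ∈ v
  · rw [PySem.List.remove?_eq_some_erase v m h]; rfl
  · rw [(PySem.List.remove?_eq_none_iff v m).mpr h, List.erase_of_not_mem h]; rfl

theorem pv_scan_nil (v : List String) : pvScanRemove [] v = v := by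
  induction v with
  | nil => rfl
  | cons a t ih => simp [pvScanRemove, PySem.Set.contains, ih]

-- pvScanRemove depends on the pending set only through membership
theorem pv_scan_congr (v : List String) : ∀ (S₁ S₂ : List String), S₁.Nodup → S₂.Nodup →
    (∀ x, x ∈ S₁ ↔ x ∈ S₂) → pvScanRemove S₁ v = pvScanRemove S₂ v := by
  induction v with
  | nil => intro _ _ _ _ _; rfl
  | cons a t ih =>
    intro S₁ S₂ h₁ h₂ hmem
    by_cases hm : a ∈ S₁
    · simp only [pvScanRemove, (pv_contains_iff S₁ a).mpr hm,
        (pv_contains_iff S₂ a).mpr ((hmem a).mp hm), if_true]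
      exact ih _ _ (PySem.Set.nodup_discard S₁ a h₁) (PySem.Set.nodup_discard S₂ a h₂)
        (fun x => by
          rw [PySem.Set.mem_discard S₁ a x, PySem.Set.mem_discard S₂ a x]
          exact and_congr_left (fun _ => hmem x))
    · have hm₂ : a ∉ S₂ := fun h => hm ((hmem a).mpr h)
      simp only [pvScanRemove, pv_contains_eq_false hm, pv_contains_eq_false hm₂,
        Bool.false_eq_true, if_false]
      rw [ih _ _ h₁ h₂ hmem]

theorem pv_scan_step (v : List String) : ∀ (S : List String) (m : String), S.Nodup → m ∉ S →
    pvScanRemove (m :: S) v = pvScanRemove S (v.erase m) := by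
  induction v with
  | nil => intro _ _ _ _; rfl
  | cons a t ih =>
    intro S m hS hm
    have hmsS : (m :: S).Nodup := List.nodup_cons.mpr ⟨hm, hS⟩
    by_cases ham : a = m
    · subst ham
      have h1 : PySem.Set.contains (a :: S) a = true :=
        (pv_contains_iff _ _).mpr List.mem_cons_self
      simp only [pvScanRemove, h1, if_true, List.erase_cons_head]
      exact pv_scan_congr t _ _ (PySem.Set.nodup_discard _ _ hmsS) hS
        (fun x => by
          rw [PySem.Set.mem_discard (a :: S) a x]
          constructor
          · rintro ⟨hx, hne⟩
            rcases List.mem_cons.mp hx with h | h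
            · exact absurd h hne
            · exact h
          · intro hx
            exact ⟨List.mem_cons_of_mem _ hx, fun he => hm (he ▸ hx)⟩)
    · rw [List.erase_cons_tail (by simp [ham])]
      by_cases haS : a ∈ S
      · have h1 : PySem.Set.contains (m :: S) a = true :=
          (pv_contains_iff _ _).mpr (List.mem_cons_of_mem _ haS)
        have h2 : PySem.Set.contains S a = true := (pv_contains_iff _ _).mpr haS
        simp only [pvScanRemove, h1, h2, if_true]
        have hcongr : pvScanRemove (PySem.Set.discard (m :: S) a) t
            = pvScanRemove (m :: PySem.Set.discard S a) t := by
          apply pv_scan_congr t _ _ (PySem.Set.nodup_discard _ _ hmsS)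
            (List.nodup_cons.mpr ⟨fun h => hm ((PySem.Set.mem_discard S a m).mp h).1,
              PySem.Set.nodup_discard _ _ hS⟩)
          intro x
          simp only [PySem.Set.mem_discard, List.mem_cons]
          constructor
          · rintro ⟨h | h, hne⟩
            · exact Or.inl h
            · exact Or.inr ⟨h, hne⟩
          · rintro (h | ⟨h, hne⟩)
            · exact ⟨Or.inl h, fun he => ham (he ▸ h)⟩
            · exact ⟨Or.inr h, hne⟩
        rw [hcongr]
        exact ih (PySem.Set.discard S a) m (PySem.Set.nodup_discard _ _ hS)
          (fun h => hm ((PySem.Set.mem_discard S a m).mp h).1)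
      · have h1 : PySem.Set.contains (m :: S) a = false := by
          apply pv_contains_eq_false
          intro h
          rcases List.mem_cons.mp h with h | h
          · exact ham h
          · exact haS h
        have h2 : PySem.Set.contains S a = false := pv_contains_eq_false haS
        simp only [pvScanRemove, h1, h2, Bool.false_eq_true, if_false]
        rw [ih S m hS hm]

-- A's fold of first-occurrence removals over a duplicate-free marker list IS B's single scan
theorem pv_foldl_erase_eq_scan : ∀ (S : List String), S.Nodup → ∀ (v : List String),
    S.foldl (fun v m => v.erase m) v = pvScanRemove S v := by
  intro S
  induction S with
  | nil => intro _ v; simp [pv_scan_nil]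
  | cons m S' ih =>
    intro hnd v
    have hc := List.nodup_cons.mp hnd
    simp only [List.foldl_cons]
    rw [ih hc.2 (v.erase m), ← pv_scan_step (v := v) S' m hc.2 hc.1]

-- intersection fold: once the accumulator is duplicate-free, A's extra Set.ofList is the identity
theorem pv_interfold_eq (g : String → List String) :
    ∀ (L : List String) (s : List String), s.Nodup →
    L.foldl (fun mc item => PySem.Set.inter (PySem.Set.ofList mc) (g item)) s
      = L.foldl (fun c item => PySem.Set.inter c (g item)) s := by
  intro L
  induction L with
  | nil => intro _ _; rfl
  | cons i L' ih =>
    intro s hs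
    simp only [List.foldl_cons, PySem.Set.ofList_eq_self_of_nodup s hs]
    exact ih _ (PySem.Set.nodup_inter _ _ hs)

theorem pv_interfold_eq2 (g : String → List String) (L : List String) (v0 : List String)
    (h : L ≠ []) :
    L.foldl (fun mc item => PySem.Set.inter (PySem.Set.ofList mc) (g item)) v0
      = L.foldl (fun c item => PySem.Set.inter c (g item)) (PySem.Set.ofList v0) := by
  cases L with
  | nil => exact absurd rfl h
  | cons i L' =>
    simp only [List.foldl_cons]
    exact pv_interfold_eq g L' _ (PySem.Set.nodup_inter _ _ (PySem.Set.nodup_ofList v0))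

theorem pv_interfold_nodup (g : String → List String) :
    ∀ (L : List String) (s : List String), s.Nodup →
    (L.foldl (fun c item => PySem.Set.inter c (g item)) s).Nodup := by
  intro L
  induction L with
  | nil => intro _ hs; exact hs
  | cons i L' ih => intro s hs; exact ih _ (PySem.Set.nodup_inter _ _ hs)

-- A's (lst, Mono) loop: the first component is a filter
theorem pv_lst_eq_filter :
    ∀ (l : List String) (acc : List String) (mono : Option String),
    (l.foldl pvMacMonoStep (acc, mono)).1
      = acc ++ l.filter (fun k => PySem.Str.slice k none (some 3) == "Mac") := by
  intro l
  induction l with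
  | nil => intro acc mono; simp
  | cons a l' ih =>
    intro acc mono
    by_cases h3 : (PySem.Str.slice a none (some 3) == "Mac") = true
    · by_cases h4 : (PySem.Str.slice a none (some 4) == "Mono") = true
      · rw [List.foldl_cons,
          show pvMacMonoStep (acc, mono) a = (acc ++ [a], some a) from by
            simp [pvMacMonoStep, h3, h4], ih]
        simp [h3]
      · rw [List.foldl_cons,
          show pvMacMonoStep (acc, mono) a = (acc ++ [a], mono) from by
            simp [pvMacMonoStep, h3, h4], ih]
        simp [h3]
    · by_cases h4 : (PySem.Str.slice a none (some 4) == "Mono") = true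
      · rw [List.foldl_cons,
          show pvMacMonoStep (acc, mono) a = (acc, some a) from by
            simp [pvMacMonoStep, h3, h4], ih]
        simp [h3]
      · rw [List.foldl_cons,
          show pvMacMonoStep (acc, mono) a = (acc, mono) from by
            simp [pvMacMonoStep, h3, h4], ih]
        simp [h3]

theorem pv_lst_eq_filter' (l : List String) :
    (l.foldl pvMacMonoStep (([] : List String), (none : Option String))).1
      = l.filter (fun k => PySem.Str.slice k none (some 3) == "Mac") := by
  rw [pv_lst_eq_filter]; simp

theorem pv_getD_eq (d : PySem.Dict String (List String)) (k : String) (v : List String) :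
    d.getD k v = (d.get? k).getD v := rfl

-- get? through A's modify loop over duplicate-free, present keys
theorem pv_foldl_modify_get? (f : List String → List String) :
    ∀ (L : List String) (dd : PySem.Dict String (List String)), L.Nodup →
    (∀ i ∈ L, (dd.get? i).isSome) → ∀ k,
    (L.foldl (fun dd item => dd.modify item [] f) dd).get? k
      = if k ∈ L then (dd.get? k).map f else dd.get? k := by
  intro L
  induction L with
  | nil => intro dd _ _ k; simp
  | cons i L' ih =>
    intro dd hnd hsome k
    have hc := List.nodup_cons.mp hnd
    obtain ⟨vi, hvi⟩ := Option.isSome_iff_exists.mp (hsome i List.mem_cons_self)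
    have hmod : dd.modify i [] f = dd.insert i (f vi) := by
      show dd.insert i (f (dd.getD i [])) = dd.insert i (f vi)
      rw [pv_getD_eq, hvi]
      rfl
    simp only [List.foldl_cons, hmod]
    rw [ih _ hc.2 (fun j hj => by
      by_cases hji : j = i
      · subst hji; rw [PySem.Dict.get?_insert_self]; rfl
      · rw [PySem.Dict.get?_insert_of_ne _ _ hji]
        exact hsome j (List.mem_cons_of_mem _ hj)) k]
    by_cases hk : k = i
    · subst hk
      simp only [hc.1, if_false, List.mem_cons, true_or, if_true,
        PySem.Dict.get?_insert_self, hvi, Option.map_some]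
    · rw [PySem.Dict.get?_insert_of_ne _ _ hk]
      by_cases hkL : k ∈ L'
      · simp [hkL, List.mem_cons, hk]
      · simp [hkL, List.mem_cons, hk]

theorem pv_foldl_modify_keys (f : List String → List String) :
    ∀ (L : List String) (dd : PySem.Dict String (List String)),
    (∀ i ∈ L, dd.contains i = true) →
    (L.foldl (fun dd item => dd.modify item [] f) dd).keys = dd.keys := by
  intro L
  induction L with
  | nil => intro dd _; rfl
  | cons i L' ih =>
    intro dd hcon
    simp only [List.foldl_cons]
    have hkeys : (dd.modify i [] f).keys = dd.keys :=
      PySem.Dict.keys_insert_of_contains dd _ (hcon i List.mem_cons_self)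
    rw [ih _ (fun j hj => by
      rw [PySem.Dict.contains_eq_isSome_get?]
      by_cases hji : j = i
      · subst hji
        rw [show dd.modify j [] f = dd.insert j (f (dd.getD j [])) from rfl,
          PySem.Dict.get?_insert_self]
        rfl
      · rw [show dd.modify i [] f = dd.insert i (f (dd.getD i [])) from rfl,
          PySem.Dict.get?_insert_of_ne _ _ hji,
          ← PySem.Dict.contains_eq_isSome_get?]
        exact hcon j (List.mem_cons_of_mem _ hj)), hkeys]

-- ===== VERDICT (by name: the statement is the Claim_ definition above) =====
theorem remove_mac_common_markers_spec : Claim_equal_remove_mac_common_markers := by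
  intro mkrs_dict _ hnd
  unfold Spec_remove_mac_common_markers
  show remove_mac_common_markers mkrs_dict = remove_mac_common_markers_alt mkrs_dict
  simp only [remove_mac_common_markers, remove_mac_common_markers_alt]
  rw [pv_lst_eq_filter']
  have hKnd : (PySem.Dict.mk mkrs_dict).keys.Nodup := hnd
  by_cases hlen :
      ((PySem.Dict.mk mkrs_dict).keys.filter
        (fun k => PySem.Str.slice k none (some 3) == "Mac")).length > 1
  · rw [if_pos hlen, if_pos hlen]
    set d := PySem.Dict.mk mkrs_dict with hd
    set L := d.keys.filter (fun k => PySem.Str.slice k none (some 3) == "Mac") with hLdef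
    have hdrop : L.drop 1 ≠ [] := by
      intro h
      have := congrArg List.length h
      simp only [List.length_drop, List.length_nil] at this
      omega
    have hC : (L.drop 1).foldl
        (fun mc item => PySem.Set.inter (PySem.Set.ofList mc) (d.getD item [])) (d.getD L.headI [])
        = (L.drop 1).foldl (fun c item => PySem.Set.inter c (d.getD item []))
            (PySem.Set.ofList (d.getD L.headI [])) :=
      pv_interfold_eq2 _ _ _ hdrop
    rw [hC]
    set c := (L.drop 1).foldl (fun c item => PySem.Set.inter c (d.getD item []))
        (PySem.Set.ofList (d.getD L.headI [])) with hcdef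
    have hCnd : c.Nodup := pv_interfold_nodup _ _ _ (PySem.Set.nodup_ofList _)
    have hscan : ∀ v : List String,
        c.foldl (fun v mkr => (PySem.List.remove? v mkr).getD v) v = pvScanRemove c v := by
      intro v
      have hfun : (fun (v : List String) (mkr : String) => (PySem.List.remove? v mkr).getD v)
          = fun (v : List String) (mkr : String) => v.erase mkr := by
        funext v m; exact pv_oneRemove_eq_erase v m
      rw [hfun]
      exact pv_foldl_erase_eq_scan c hCnd v
    simp only [hscan]
    have hsub : ∀ i ∈ L, i ∈ d.keys := fun i h => List.mem_of_mem_filter h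
    have hcon : ∀ i ∈ L, d.contains i = true :=
      fun i h => (PySem.Dict.contains_iff_mem_keys d i).mpr (hsub i h)
    have hsomeK : ∀ i ∈ d.keys, (d.get? i).isSome := fun i h => by
      rw [← PySem.Dict.contains_eq_isSome_get?]
      exact (PySem.Dict.contains_iff_mem_keys d i).mpr h
    have hLnd : L.Nodup := hKnd.filter _
    have hd2keys := pv_foldl_modify_keys (fun v => pvScanRemove c v) L d hcon
    have hd2get := pv_foldl_modify_get? (fun v => pvScanRemove c v) L d hLnd
      (fun i hi => hsomeK i (hsub i hi))
    have hd2nd : (L.foldl (fun dd item => dd.modify item [] (fun v => pvScanRemove c v)) d).keys.Nodup := by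
      rw [hd2keys]; exact hKnd
    rw [PySem.Dict.items_eq_map_keys _ hd2nd [], hd2keys]
    have hitems : mkrs_dict = d.keys.map (fun k => (k, d.getD k [])) :=
      PySem.Dict.items_eq_map_keys d hKnd []
    conv_rhs => rw [hitems]
    rw [List.map_map]
    apply List.map_congr_left
    intro k hk
    obtain ⟨v, hv⟩ := Option.isSome_iff_exists.mp (hsomeK k hk)
    by_cases hkL : k ∈ L
    · have hp : (PySem.Str.slice k none (some 3) == "Mac") = true := (List.mem_filter.mp hkL).2
      simp only [Function.comp, hp, if_true, pv_getD_eq, hd2get, hkL, if_true, hv,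
        Option.map_some, Option.getD_some]
    · have hp : (PySem.Str.slice k none (some 3) == "Mac") = false := by
        cases hh : (PySem.Str.slice k none (some 3) == "Mac")
        · rfl
        · exact absurd (List.mem_filter.mpr ⟨hk, hh⟩) hkL
      simp only [Function.comp, hp, Bool.false_eq_true, if_false, pv_getD_eq, hd2get, hkL]
  · rw [if_neg hlen, if_neg hlen]
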